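-- pv_equiv track=rewrite | github.com/nitvishn/ProjectEuler | p091.py | triplet
-- ===== SOURCE A (Python) =====
-- from copy import copy
--
-- def distance_squared(x1, y1, x2, y2):
--     return (x1 - x2)**2 + (y1 - y2)**2
--
-- def triplet(x1, y1, x2, y2):
--     lengths = [distance_squared(0, 0, x1, y1), distance_squared(
--         0, 0, x2, y2), distance_squared(x1, y1, x2, y2)]
--     if 0 in lengths:
--         return False
--     for hyp in lengths:
--         remaining = copy(lengths)
--         remaining.remove(hyp)
--         total = 0
--         for l in remaining:
--             total += l
--         if total == hyp:
--             return True
--     return False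
-- ===== SOURCE B (Python) =====
-- def triplet(x1, y1, x2, y2):
--     a = x1 * x1 + y1 * y1
--     b = x2 * x2 + y2 * y2
--     c = (x1 - x2) ** 2 + (y1 - y2) ** 2
--     if a == 0 or b == 0 or c == 0:
--         return False
--     return 2 * max(a, b, c) == a + b + c
-- ===== Notes on version B (the rewrite author's own statement) =====
-- stated objective: simpler
-- what changed: Replaces the try-each-length-as-hypotenuse loop with copy/remove/sum by a single closed-form arithmetic test: only the maximal squared length can equal the sum of the other two (all are positive after the zero guard), so the condition is 2*max == total.
import Mathlib
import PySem

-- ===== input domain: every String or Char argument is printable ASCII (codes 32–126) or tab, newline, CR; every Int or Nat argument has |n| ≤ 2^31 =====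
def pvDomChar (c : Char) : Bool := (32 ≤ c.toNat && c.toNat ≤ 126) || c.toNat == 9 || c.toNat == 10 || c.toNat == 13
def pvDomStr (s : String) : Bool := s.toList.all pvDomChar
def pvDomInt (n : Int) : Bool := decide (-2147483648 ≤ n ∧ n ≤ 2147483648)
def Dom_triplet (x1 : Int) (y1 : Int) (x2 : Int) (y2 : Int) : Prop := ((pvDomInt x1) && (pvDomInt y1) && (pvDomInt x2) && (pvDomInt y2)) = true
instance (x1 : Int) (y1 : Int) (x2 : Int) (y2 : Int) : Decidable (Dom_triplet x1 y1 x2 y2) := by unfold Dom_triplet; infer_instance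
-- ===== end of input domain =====

-- B replaces A's try-each-length-as-hypotenuse loop (copy/remove/sum) by the closed-form
-- test 2*max == total; objective: simpler.
-- ===== PORT A =====
def distance_squared (x1 : Int) (y1 : Int) (x2 : Int) (y2 : Int) : Int :=
  (x1 - x2) ^ 2 + (y1 - y2) ^ 2

def triplet (x1 : Int) (y1 : Int) (x2 : Int) (y2 : Int) : Bool :=
  let lengths : List Int :=
    [distance_squared 0 0 x1 y1, distance_squared 0 0 x2 y2, distance_squared x1 y1 x2 y2]
  if lengths.contains 0 then false
  else
    -- for hyp in lengths: … if total == hyp: return True / return False  →  any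
    lengths.any (fun hyp =>
      let remaining := (PySem.List.remove? lengths hyp).getD []
      let total := remaining.foldl (· + ·) 0
      total == hyp)

-- ===== PORT B =====
def triplet_alt (x1 : Int) (y1 : Int) (x2 : Int) (y2 : Int) : Bool :=
  let a := x1 * x1 + y1 * y1
  let b := x2 * x2 + y2 * y2
  let c := (x1 - x2) ^ 2 + (y1 - y2) ^ 2
  if a == 0 || b == 0 || c == 0 then false
  else 2 * max a (max b c) == a + b + c

-- ===== PRECONDITION & SPEC =====
def Spec_triplet (x1 : Int) (y1 : Int) (x2 : Int) (y2 : Int) (out : Bool) : Prop := out = triplet_alt x1 y1 x2 y2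
instance (x1 : Int) (y1 : Int) (x2 : Int) (y2 : Int) (out : Bool) : Decidable (Spec_triplet x1 y1 x2 y2 out) := by unfold Spec_triplet; infer_instance

-- ===== CLAIM (what is proved, stated in full; the proofs are below) =====
def Claim_equal_triplet : Prop := ∀ (x1 : Int) (y1 : Int) (x2 : Int) (y2 : Int), Dom_triplet x1 y1 x2 y2 → Spec_triplet x1 y1 x2 y2 (triplet x1 y1 x2 y2)

-- ===== LEMMAS AND PROOFS =====
-- core fact: for nonnegative a b c, A's per-hypotenuse scan agrees with B's 2*max = total test
lemma key (a b c : Int) (ha : 0 ≤ a) (hb : 0 ≤ b) (hc : 0 ≤ c) :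
    (if [a, b, c].contains 0 then false
     else [a, b, c].any (fun hyp =>
        ((PySem.List.remove? [a, b, c] hyp).getD []).foldl (· + ·) 0 == hyp))
    = (if a == 0 || b == 0 || c == 0 then false
       else 2 * max a (max b c) == a + b + c) := by
  have e1 : PySem.List.remove? [a, b, c] a = some ([a, b, c].erase a) :=
    PySem.List.remove?_eq_some_erase _ _ (by simp)
  have e2 : PySem.List.remove? [a, b, c] b = some ([a, b, c].erase b) :=
    PySem.List.remove?_eq_some_erase _ _ (by simp)
  have e3 : PySem.List.remove? [a, b, c] c = some ([a, b, c].erase c) :=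
    PySem.List.remove?_eq_some_erase _ _ (by simp)
  rw [Bool.eq_iff_iff]
  simp only [List.any_cons, List.any_nil, e1, e2, e3, Option.getD_some, List.erase_cons,
    List.erase_nil, List.contains_cons, List.contains_nil, Bool.or_eq_true, beq_iff_eq]
  split_ifs <;> simp_all <;> omega

-- ===== VERDICT (by name: the statement is the Claim_ definition above) =====
theorem triplet_spec : Claim_equal_triplet := by
  intro x1 y1 x2 y2 _
  unfold Spec_triplet triplet triplet_alt distance_squared
  have h1 : (0 - x1) ^ 2 + (0 - y1) ^ 2 = x1 * x1 + y1 * y1 := by ring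
  have h2 : (0 - x2) ^ 2 + (0 - y2) ^ 2 = x2 * x2 + y2 * y2 := by ring
  rw [h1, h2]
  exact key _ _ _ (add_nonneg (mul_self_nonneg x1) (mul_self_nonneg y1))
    (add_nonneg (mul_self_nonneg x2) (mul_self_nonneg y2)) (by positivity)
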